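-- pv_equiv track=rewrite | github.com/Arafat245/agentic_ai | project/temp_exps/phase6_utils.py | parse_prediction
-- ===== SOURCE A (Python) =====
-- def parse_prediction(response_text):
--     """
--     Parse LLM response to extract prediction and reasoning.
--     Returns (pred_int, reason_str).
--     """
--     if response_text is None:
--         return 0, "no response"
--     text = response_text.strip().lower()
--
--     # Try structured format first: "Prediction: interaction"
--     for line in response_text.strip().split('\n'):
--         line_lower = line.strip().lower()
--         if line_lower.startswith('prediction:'):
--             val = line_lower.split(':', 1)[1].strip()
--             if 'no_interaction' in val or 'no interaction' in val:
--                 reason = _extract_reason(response_text)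
--                 return 0, reason
--             elif 'interaction' in val:
--                 reason = _extract_reason(response_text)
--                 return 1, reason
--
--     # Fallback: keyword search
--     # Check no_interaction first (it contains "interaction")
--     if 'no_interaction' in text or 'no interaction' in text:
--         return 0, response_text.strip()
--     elif 'interaction' in text:
--         return 1, response_text.strip()
--
--     # Default to majority class
--     return 0, response_text.strip()
--
-- def _extract_reason(response_text):
--     """Extract the Reason line from structured response."""
--     for line in response_text.strip().split('\n'):
--         if line.strip().lower().startswith('reason:'):
--             return line.split(':', 1)[1].strip()
--     return response_text.strip()
-- ===== SOURCE B (Python) =====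
-- def parse_prediction(response_text):
--     """Single pass over the lines: record the first recognized prediction
--     label and the first Reason line together, then decide once at the end."""
--     if response_text is None:
--         return 0, "no response"
--     stripped = response_text.strip()
--     pred = None
--     reason = None
--     for line in stripped.split('\n'):
--         low = line.strip().lower()
--         if pred is None and low.startswith('prediction:'):
--             val = low.split(':', 1)[1].strip()
--             if 'no_interaction' in val or 'no interaction' in val:
--                 pred = 0
--             elif 'interaction' in val:
--                 pred = 1
--         if reason is None and low.startswith('reason:'):
--             reason = line.split(':', 1)[1].strip()
--     if pred is not None:
--         return pred, reason if reason is not None else stripped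
--     low_all = stripped.lower()
--     if 'no_interaction' in low_all or 'no interaction' in low_all:
--         return 0, stripped
--     if 'interaction' in low_all:
--         return 1, stripped
--     return 0, stripped
-- ===== Notes on version B (the rewrite author's own statement) =====
-- stated objective: simpler
-- what changed: B replaces A's prediction scan plus the separate _extract_reason rescan with one single pass over the lines that records the first recognized prediction label and the first Reason line together, deciding once after the loop.
import Mathlib
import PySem

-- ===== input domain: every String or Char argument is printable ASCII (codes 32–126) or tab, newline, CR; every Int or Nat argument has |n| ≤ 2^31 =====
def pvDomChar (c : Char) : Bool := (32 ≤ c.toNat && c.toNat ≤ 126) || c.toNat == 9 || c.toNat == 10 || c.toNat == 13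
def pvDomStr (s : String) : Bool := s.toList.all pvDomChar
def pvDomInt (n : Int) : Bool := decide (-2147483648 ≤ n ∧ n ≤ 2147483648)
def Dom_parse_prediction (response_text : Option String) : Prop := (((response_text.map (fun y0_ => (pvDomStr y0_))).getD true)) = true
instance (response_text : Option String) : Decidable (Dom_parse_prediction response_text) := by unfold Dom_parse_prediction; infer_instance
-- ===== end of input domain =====

-- B changes the decomposition: one single pass over the lines recording the first
-- recognized prediction label and the first Reason line together, instead of A's
-- prediction scan plus a separate _extract_reason rescan (objective: simpler).

-- shared idiom of both Pythons: s.split(':', 1)[1].strip()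
-- (the .getD "" is unreachable in both ports: it is applied only to lines that start with a prefix containing ':')
def pvColonTail (s : String) : String :=
  PySem.Str.strip (((PySem.Str.splitMax? s ":" 1).getD []).drop 1).headI

-- ===== PORT A =====
-- _extract_reason's loop over the lines
def aReasonLoop : List String → Option String
  | [] => none
  | l :: rest =>
    if PySem.Str.startswith (PySem.Str.lower (PySem.Str.strip l)) "reason:" then
      some (pvColonTail l)
    else aReasonLoop rest

def extractReason (rt : String) : String :=
  (aReasonLoop ((((PySem.Str.split? (PySem.Str.strip rt) "\n").getD [])))).getD (PySem.Str.strip rt)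

-- A's prediction loop; returns the early-returned pair, none = loop fell through
def aPredLoop (rt : String) : List String → Option (Int × String)
  | [] => none
  | line :: rest =>
    let ll := PySem.Str.lower (PySem.Str.strip line)
    if PySem.Str.startswith ll "prediction:" then
      let val := pvColonTail ll
      if PySem.Str.isIn "no_interaction" val || PySem.Str.isIn "no interaction" val then
        some (0, extractReason rt)
      else if PySem.Str.isIn "interaction" val then
        some (1, extractReason rt)
      else aPredLoop rt rest
    else aPredLoop rt rest

def parse_prediction (response_text : Option String) : Int × String :=
  match response_text with
  | none => (0, "no response")
  | some rt =>
    let text := PySem.Str.lower (PySem.Str.strip rt)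
    match aPredLoop rt (((PySem.Str.split? (PySem.Str.strip rt) "\n").getD [])) with
    | some r => r
    | none =>
      if PySem.Str.isIn "no_interaction" text || PySem.Str.isIn "no interaction" text then
        (0, PySem.Str.strip rt)
      else if PySem.Str.isIn "interaction" text then (1, PySem.Str.strip rt)
      else (0, PySem.Str.strip rt)

-- ===== PORT B =====
-- the single pass, carrying both accumulators
def bLoop : List String → Option Int → Option String → Option Int × Option String
  | [], pred, reason => (pred, reason)
  | line :: rest, pred, reason =>
    let low := PySem.Str.lower (PySem.Str.strip line)
    let pred' :=
      if pred.isNone && PySem.Str.startswith low "prediction:" then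
        let val := pvColonTail low
        if PySem.Str.isIn "no_interaction" val || PySem.Str.isIn "no interaction" val then
          some (0 : Int)
        else if PySem.Str.isIn "interaction" val then some (1 : Int)
        else none
      else pred
    let reason' :=
      if reason.isNone && PySem.Str.startswith low "reason:" then some (pvColonTail line)
      else reason
    bLoop rest pred' reason'

def parse_prediction_alt (response_text : Option String) : Int × String :=
  match response_text with
  | none => (0, "no response")
  | some rt =>
    let stripped := PySem.Str.strip rt
    match bLoop (((PySem.Str.split? stripped "\n").getD [])) none none with
    | (some p, reason) => (p, reason.getD stripped)
    | (none, _) =>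
      let lowAll := PySem.Str.lower stripped
      if PySem.Str.isIn "no_interaction" lowAll || PySem.Str.isIn "no interaction" lowAll then
        (0, stripped)
      else if PySem.Str.isIn "interaction" lowAll then (1, stripped)
      else (0, stripped)

-- ===== PRECONDITION & SPEC =====
def Spec_parse_prediction (response_text : Option String) (out : Int × String) : Prop := out = parse_prediction_alt response_text
instance (response_text : Option String) (out : Int × String) : Decidable (Spec_parse_prediction response_text out) := by unfold Spec_parse_prediction; infer_instance

-- ===== CLAIM (what is proved, stated in full; the proofs are below) =====
def Claim_equal_parse_prediction : Prop := ∀ (response_text : Option String), Dom_parse_prediction response_text → Spec_parse_prediction response_text (parse_prediction response_text)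

-- ===== LEMMAS AND PROOFS =====

-- the label component of B's loop, isolated (proof-side helper)
def bPred : List String → Option Int
  | [] => none
  | line :: rest =>
    let low := PySem.Str.lower (PySem.Str.strip line)
    if PySem.Str.startswith low "prediction:" then
      let val := pvColonTail low
      if PySem.Str.isIn "no_interaction" val || PySem.Str.isIn "no interaction" val then
        some (0 : Int)
      else if PySem.Str.isIn "interaction" val then some (1 : Int)
      else bPred rest
    else bPred rest

theorem bLoop_snd_some (lines : List String) (p : Option Int) (v : String) :
    (bLoop lines p (some v)).2 = some v := by
  induction lines generalizing p with
  | nil => rfl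
  | cons l rest ih =>
    simp only [bLoop, Option.isNone_some, Bool.false_and]
    exact ih _

theorem bLoop_snd (lines : List String) (p : Option Int) :
    (bLoop lines p none).2 = aReasonLoop lines := by
  induction lines generalizing p with
  | nil => rfl
  | cons l rest ih =>
    simp only [bLoop, aReasonLoop, Option.isNone_none, Bool.true_and]
    by_cases hr : PySem.Str.startswith (PySem.Str.lower (PySem.Str.strip l)) "reason:"
    · simp only [hr, if_pos]
      exact bLoop_snd_some rest _ _
    · simp only [hr, if_false, Bool.false_eq_true]
      exact ih _

theorem bLoop_fst_some (lines : List String) (r : Option String) (q : Int) :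
    (bLoop lines (some q) r).1 = some q := by
  induction lines generalizing r with
  | nil => rfl
  | cons l rest ih =>
    simp only [bLoop, Option.isNone_some, Bool.false_and]
    exact ih _

theorem bLoop_fst_none (lines : List String) (r : Option String) :
    (bLoop lines none r).1 = bPred lines := by
  induction lines generalizing r with
  | nil => rfl
  | cons l rest ih =>
    simp only [bLoop, bPred, Option.isNone_none, Bool.true_and]
    split_ifs with h h2 h3 <;>
      first
        | exact bLoop_fst_some rest _ _
        | exact ih _

theorem aPredLoop_eq (rt : String) (lines : List String) :
    aPredLoop rt lines = (bPred lines).map fun p => (p, extractReason rt) := by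
  induction lines with
  | nil => rfl
  | cons l rest ih =>
    simp only [aPredLoop, bPred]
    split_ifs with h h2 h3 <;> simp [ih]

-- ===== VERDICT =====
theorem parse_prediction_spec : Claim_equal_parse_prediction := by
  intro rt? _
  unfold Spec_parse_prediction
  cases rt? with
  | none => rfl
  | some rt =>
    simp only [parse_prediction, parse_prediction_alt]
    rw [aPredLoop_eq]
    have hfst := bLoop_fst_none (((PySem.Str.split? (PySem.Str.strip rt) "\n").getD [])) none
    have hsnd := bLoop_snd (((PySem.Str.split? (PySem.Str.strip rt) "\n").getD [])) none
    rcases hb : bLoop (((PySem.Str.split? (PySem.Str.strip rt) "\n").getD [])) none none with ⟨p, r⟩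
    rw [hb] at hfst hsnd
    cases p with
    | none =>
      rw [← hfst]
      rfl
    | some q =>
      rw [← hfst, Option.map_some]
      simp only [extractReason, ← hsnd]
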